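-- pv_equiv track=rewrite | github.com/iks15174/study | programmers/상담원인원.py | solution
-- ===== SOURCE A (Python) =====
-- import math
--
-- def solution(k, n, reqs):
--     answer = 0
--     consultant_cnt_by_counseling_type = [1] * k
--     for _ in range(n - k):
--         best_conseling_type = get_best_conseling_type_for_add_people(
--             reqs, consultant_cnt_by_counseling_type
--         )
--         consultant_cnt_by_counseling_type[best_conseling_type] += 1
--
--     for counseling_type in range(k):
--         reqs_of_counseling_type = list(filter(
--             lambda req: req[2] == counseling_type + 1, reqs
--         ))
--         answer += get_waiting_time(
--             reqs_of_counseling_type, consultant_cnt_by_counseling_type[counseling_type]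
--         )
--     return answer
--
-- def get_best_conseling_type_for_add_people(reqs, consultant_cnt_by_counseling_type):
--     max_reduced_time = -math.inf
--     min_reduced_index = -1
--
--     for counseling_type, personnel in enumerate(consultant_cnt_by_counseling_type):
--         reqs_of_counseling_type = list(filter(
--             lambda req: req[2] == counseling_type + 1, reqs
--         ))
--         orginal_waiting_time = get_waiting_time(reqs_of_counseling_type, personnel)
--         reduced_time = orginal_waiting_time - get_waiting_time(
--             reqs_of_counseling_type, personnel + 1
--         )
--         if reduced_time > max_reduced_time:
--             min_reduced_index = counseling_type
--             max_reduced_time = reduced_time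
--
--     return min_reduced_index
--
-- def get_waiting_time(reqs_of_counseling_type, personnel):
--     consultation_schedule = init_consultation_schedule(personnel)
--     waiting_time = 0
--     for start_time, consultation_duration, _ in reqs_of_counseling_type:
--         consultant = get_fastest_finish_consultant(consultation_schedule)
--         fastest_finish_time = consultation_schedule[consultant]
--
--         if fastest_finish_time <= start_time:
--             consultation_schedule[consultant] = start_time + consultation_duration
--         else:
--             consultation_schedule[consultant] = (
--                 fastest_finish_time + consultation_duration
--             )
--             waiting_time += fastest_finish_time - start_time
--
--     return waiting_time
--
-- def get_fastest_finish_consultant(consultation_schedule):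
--     for consultant, finish_time in consultation_schedule.items():
--         if min(consultation_schedule.values()) == finish_time:
--             return consultant
--
-- def init_consultation_schedule(personnel):
--     consultation_schedule = {}
--     for i in range(personnel):
--         consultation_schedule[i] = 0
--     return consultation_schedule
-- ===== SOURCE B (Python) =====
-- import heapq
--
-- def solution(k, n, reqs):
--     # group the requests by counseling type once (A re-filters inside every round)
--     groups = [[(s, d) for s, d, t in reqs if t == i + 1] for i in range(k)]
--
--     def wait(g, p):
--         # min-heap of finish times instead of A's linear min-scan over a dict
--         heap = [0] * p
--         total = 0
--         for s, d in g:
--             f = heapq.heappop(heap)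
--             if f > s:
--                 total += f - s
--                 heapq.heappush(heap, f + d)
--             else:
--                 heapq.heappush(heap, s + d)
--         return total
--
--     cnt = [1] * k
--     for _ in range(n - k):
--         red = [wait(g, c) - wait(g, c + 1) for g, c in zip(groups, cnt)]
--         best = max(range(k), key=red.__getitem__)
--         cnt[best] += 1
--     return sum(wait(g, c) for g, c in zip(groups, cnt))
-- ===== Notes on version B (the rewrite author's own statement) =====
-- stated objective: faster
-- what changed: B groups the requests by counseling type once up front and simulates each type's schedule with a heapq min-heap (pop/push in O(log p)), instead of A's re-filtering of reqs and linear min-scan over a dict of consultants at every simulation step of every candidate type of every round.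
import Mathlib
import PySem

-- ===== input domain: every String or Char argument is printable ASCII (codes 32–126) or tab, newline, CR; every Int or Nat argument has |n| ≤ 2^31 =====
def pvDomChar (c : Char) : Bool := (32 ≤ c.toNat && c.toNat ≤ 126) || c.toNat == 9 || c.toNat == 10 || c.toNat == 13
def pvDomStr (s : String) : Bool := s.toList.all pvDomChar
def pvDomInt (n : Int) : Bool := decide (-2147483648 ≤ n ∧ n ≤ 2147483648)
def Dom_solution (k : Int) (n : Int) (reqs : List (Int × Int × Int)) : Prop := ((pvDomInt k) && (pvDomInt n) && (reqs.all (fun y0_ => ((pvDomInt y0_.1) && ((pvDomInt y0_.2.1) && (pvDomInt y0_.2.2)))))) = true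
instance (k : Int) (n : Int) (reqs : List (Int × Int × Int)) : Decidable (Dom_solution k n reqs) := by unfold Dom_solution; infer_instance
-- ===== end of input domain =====

-- B groups the requests by counseling type once up front and simulates each type's schedule with a
-- min-heap instead of A's re-filtering of reqs and linear min-scan over the consultants at every step.

-- ===== PORT A =====

-- init_consultation_schedule: the Python dict {0: 0, …, personnel-1: 0} has the fixed key set
-- 0..personnel-1 in insertion order and is only ever overwritten in place, so it is represented
-- exactly by the list of finish times (index = consultant key).
def initScheduleA (personnel : Int) : List Int :=
  (PySem.List.pyRange 0 personnel 1).foldl (fun d _ => d ++ [(0 : Int)]) []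

-- get_fastest_finish_consultant: first key whose value equals min(values()); None if the dict is empty
def getFastestA (sched : List Int) : Option Int :=
  ((PySem.List.enumerate sched).find? (fun cf =>
      PySem.List.min? sched (fun x => x) == some cf.2)).map Prod.fst

-- loop body of get_waiting_time (state = (schedule, waiting_time), request = (start, duration))
def stepA (st : List Int × Int) (sd : Int × Int) : List Int × Int :=
  match getFastestA st.1 with
  | none => st            -- Python's min() would raise on an empty dict; unreachable under Pre_
  | some c =>
    let f := PySem.List.pyGetD st.1 c 0
    if f ≤ sd.1 then (PySem.List.pySetD st.1 c (sd.1 + sd.2), st.2)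
    else (PySem.List.pySetD st.1 c (f + sd.2), st.2 + (f - sd.1))

def getWaitingTimeA (rs : List (Int × Int × Int)) (personnel : Int) : Int :=
  (rs.foldl (fun st r => stepA st (r.1, r.2.1)) (initScheduleA personnel, 0)).2

-- loop body of get_best_conseling_type_for_add_people
-- (state = (counseling_type, max_reduced_time as Option for the -inf sentinel, min_reduced_index))
def bestBodyA (reqs : List (Int × Int × Int)) (st : Int × Option Int × Int) (p : Int) :
    Int × Option Int × Int :=
  let rt := reqs.filter (fun r => r.2.2 == st.1 + 1)
  let red := getWaitingTimeA rt p - getWaitingTimeA rt (p + 1)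
  match st.2.1 with
  | none => (st.1 + 1, some red, st.1)
  | some m => if red > m then (st.1 + 1, some red, st.1) else (st.1 + 1, some m, st.2.2)

def getBestA (reqs : List (Int × Int × Int)) (cnts : List Int) : Int :=
  (cnts.foldl (bestBodyA reqs) (0, none, -1)).2.2

-- one round of the allocation loop: consultant_cnt[best] += 1
def allocStepA (reqs : List (Int × Int × Int)) (cs : List Int) : List Int :=
  let b := getBestA reqs cs
  PySem.List.pySetD cs b (PySem.List.pyGetD cs b 0 + 1)

def solution (k : Int) (n : Int) (reqs : List (Int × Int × Int)) : Int :=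
  let cnts := (PySem.List.pyRange 0 (n - k) 1).foldl (fun cs _ => allocStepA reqs cs)
    (List.replicate k.toNat 1)
  (PySem.List.pyRange 0 k 1).foldl (fun ans t =>
      ans + getWaitingTimeA (reqs.filter (fun r => r.2.2 == t + 1))
              (PySem.List.pyGetD cnts t 0)) 0

-- ===== PORT B =====

-- groups = [[(s, d) for s, d, t in reqs if t == i + 1] for i in range(k)]
def groupsB (k : Int) (reqs : List (Int × Int × Int)) : List (List (Int × Int)) :=
  (PySem.List.pyRange 0 k 1).map (fun i =>
    (reqs.filter (fun r => r.2.2 == i + 1)).map (fun r => (r.1, r.2.1)))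

-- loop body of wait; the heapq min-heap of finish times is modelled as an ascending sorted list:
-- heappop = take the head (the minimum), heappush = ordered insertion
def stepB (st : List Int × Int) (sd : Int × Int) : List Int × Int :=
  match st.1 with
  | [] => st              -- heappop on an empty heap raises; unreachable under Pre_
  | f :: rest =>
    if f > sd.1 then (List.orderedInsert (· ≤ ·) (f + sd.2) rest, st.2 + (f - sd.1))
    else (List.orderedInsert (· ≤ ·) (sd.1 + sd.2) rest, st.2)

def waitB (g : List (Int × Int)) (p : Int) : Int :=
  (g.foldl stepB (List.replicate p.toNat 0, 0)).2

-- loop body of max(range(k), key=red.__getitem__) (state = (next index, best index, best value))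
def argBodyB (st : Int × Int × Int) (v : Int) : Int × Int × Int :=
  if v > st.2.2 then (st.1 + 1, st.1, v) else (st.1 + 1, st.2.1, st.2.2)

def argmaxB (red : List Int) : Int :=
  match red with
  | [] => -1              -- Python's max() raises on an empty range; unreachable under Pre_
  | r :: rest => (rest.foldl argBodyB (1, 0, r)).2.1

def redListB (gs : List (List (Int × Int))) (cnt : List Int) : List Int :=
  (gs.zip cnt).map (fun gc => waitB gc.1 gc.2 - waitB gc.1 (gc.2 + 1))

-- one round of the allocation loop: cnt[best] += 1
def allocStepB (gs : List (List (Int × Int))) (cnt : List Int) : List Int :=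
  let b := argmaxB (redListB gs cnt)
  PySem.List.pySetD cnt b (PySem.List.pyGetD cnt b 0 + 1)

def solution_alt (k : Int) (n : Int) (reqs : List (Int × Int × Int)) : Int :=
  let gs := groupsB k reqs
  let cnt := (PySem.List.pyRange 0 (n - k) 1).foldl (fun cs _ => allocStepB gs cs)
    (List.replicate k.toNat 1)
  ((gs.zip cnt).map (fun gc => waitB gc.1 gc.2)).sum

-- ===== PRECONDITION & SPEC =====
-- Pre_ excludes exactly the inputs on which A raises: with k ≤ 0 there is no counseling type, and
-- the allocation loop (run when n > k) indexes the empty counter list (IndexError).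
def Pre_solution (k : Int) (n : Int) (reqs : List (Int × Int × Int)) : Prop := 0 < k ∨ n ≤ k
instance (k : Int) (n : Int) (reqs : List (Int × Int × Int)) : Decidable (Pre_solution k n reqs) := by
  unfold Pre_solution; infer_instance

def pvWitness_solution : Int × Int × (List (Int × Int × Int)) :=
  (2, 5, [(0, 5, 1), (1, 2, 2), (2, 3, 1), (3, 1, 1)])

def Spec_solution (k : Int) (n : Int) (reqs : List (Int × Int × Int)) (out : Int) : Prop :=
  out = solution_alt k n reqs
instance (k : Int) (n : Int) (reqs : List (Int × Int × Int)) (out : Int) :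
    Decidable (Spec_solution k n reqs out) := by unfold Spec_solution; infer_instance

-- ===== CLAIM (what is proved, stated in full; the proofs are below) =====
def Claim_equal_solution : Prop := ∀ (k : Int) (n : Int) (reqs : List (Int × Int × Int)),
  Dom_solution k n reqs → Pre_solution k n reqs → Spec_solution k n reqs (solution k n reqs)

-- ===== LEMMAS AND PROOFS =====

lemma initA_eq (p : Int) : initScheduleA p = List.replicate p.toNat 0 := by
  unfold initScheduleA
  rw [PySem.List.foldl_append_singleton_eq_map (fun _ => (0 : Int))]
  simp [List.map_const', pysem]

lemma sorted_replicate (p : Nat) : List.Sorted (· ≤ ·) (List.replicate p (0 : Int)) := by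
  simp [List.Sorted, List.pairwise_replicate]

-- find? over enumerate locates the first occurrence of m
lemma find?_enumerate_eq (l : List Int) (m : Int) (hm : m ∈ l) : ∀ s : Int,
    (PySem.List.enumerate l s).find? (fun cf => (some m : Option Int) == some cf.2)
      = some (s + (l.idxOf m : Int), m) := by
  induction l with
  | nil => simp at hm
  | cons x xs ih =>
    intro s
    rw [PySem.List.enumerate_cons]
    by_cases hx : m = x
    · subst hx
      simp [List.idxOf_cons_self]
    · have hmem : m ∈ xs := by cases hm with
        | head => exact absurd rfl hx
        | tail _ h => exact h
      rw [List.find?_cons_of_neg (by simp [hx])]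
      rw [ih hmem (s + 1)]
      rw [List.idxOf_cons_ne _ (by simpa using (Ne.symm hx))]
      congr 1
      push_cast
      ring_nf

-- setting at the first occurrence of a member, as a permutation
lemma set_idxOf_perm (l : List Int) (m v : Int) (hm : m ∈ l) :
    (l.set (l.idxOf m) v).Perm (v :: l.erase m) := by
  have hj : l.idxOf m < l.length := List.idxOf_lt_length_of_mem hm
  rw [List.set_eq_take_append_cons_drop, if_pos hj]
  calc (List.take (l.idxOf m) l ++ v :: List.drop (l.idxOf m + 1) l).Perm
        (v :: (List.take (l.idxOf m) l ++ List.drop (l.idxOf m + 1) l)) := List.perm_middle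
    _ = v :: l.eraseIdx (l.idxOf m) := by rw [List.eraseIdx_eq_take_drop_succ]
    _ = v :: l.erase m := by rw [List.eraseIdx_idxOf_eq_erase]

-- one step of A's schedule simulation agrees with one heap step of B
lemma step_sync (l h : List Int) (w : Int) (sd : Int × Int)
    (hp : l.Perm h) (hs : List.Sorted (· ≤ ·) h) :
    (stepA (l, w) sd).2 = (stepB (h, w) sd).2 ∧
    (stepA (l, w) sd).1.Perm (stepB (h, w) sd).1 ∧
    List.Sorted (· ≤ ·) (stepB (h, w) sd).1 := by
  cases h with
  | nil =>
    have hl : l = [] := hp.eq_nil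
    subst hl
    refine ⟨rfl, ?_, ?_⟩
    · simp [stepA, stepB, getFastestA, PySem.List.enumerate_nil]
    · exact hs
  | cons f rest =>
    have hfl : f ∈ l := hp.symm.subset List.mem_cons_self
    have hne : l ≠ [] := List.ne_nil_of_mem hfl
    have hmin : ∀ y ∈ l, f ≤ y := by
      intro y hy
      have hyh : y ∈ f :: rest := hp.subset hy
      rcases List.mem_cons.1 hyh with h1 | h1
      · omega
      · exact List.rel_of_sorted_cons hs h1
    have hminEq : PySem.List.min? l (fun x => x) = some f := by
      cases hm : PySem.List.min? l (fun x => x) with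
      | none => exact absurd ((PySem.List.min?_eq_none_iff l _).1 hm) hne
      | some m =>
        have h1 : m ∈ l := PySem.List.min?_mem hm
        have h2 : ∀ y ∈ l, m ≤ y := fun y hy => PySem.List.min?_isMin hm y hy
        have : m = f := le_antisymm (h2 f hfl) (hmin m h1)
        rw [this]
    have hfast : getFastestA l = some (l.idxOf f : Int) := by
      unfold getFastestA
      rw [show (fun cf : Int × Int => PySem.List.min? l (fun x => x) == some cf.2)
            = (fun cf : Int × Int => (some f : Option Int) == some cf.2) by rw [hminEq]]
      rw [find?_enumerate_eq l f hfl 0]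
      simp
    have hj : l.idxOf f < l.length := List.idxOf_lt_length_of_mem hfl
    have hget : PySem.List.pyGetD l (l.idxOf f : Int) 0 = f := by
      rw [PySem.List.pyGetD_natCast]
      rw [List.getD_eq_getElem l 0 hj]
      exact List.getElem_idxOf hj
    have hsetperm : ∀ v : Int, (PySem.List.pySetD l (l.idxOf f : Int) v).Perm
        (List.orderedInsert (· ≤ ·) v rest) := by
      intro v
      rw [PySem.List.pySetD_natCast]
      refine (set_idxOf_perm l f v hfl).trans ?_
      refine List.Perm.trans ?_ (List.perm_orderedInsert _ v rest).symm
      exact List.Perm.cons v (by rw [← List.erase_cons_head f rest]; exact hp.erase f)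
    have hsorted : ∀ v : Int, List.Sorted (· ≤ ·) (List.orderedInsert (· ≤ ·) v rest) :=
      fun v => List.Sorted.orderedInsert v rest (List.sorted_cons.1 hs).2
    by_cases hc : f ≤ sd.1
    · have hcB : ¬ f > sd.1 := by omega
      refine ⟨?_, ?_, ?_⟩ <;>
        simp only [stepA, stepB, hfast, hget, if_pos hc, if_neg hcB] <;>
        first
          | rfl
          | exact hsetperm _
          | exact hsorted _
    · have hcB : f > sd.1 := by omega
      refine ⟨?_, ?_, ?_⟩ <;>
        simp only [stepA, stepB, hfast, hget, if_neg hc, if_pos hcB] <;>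
        first
          | rfl
          | exact hsetperm _
          | exact hsorted _

lemma wait_fold_sync (g : List (Int × Int)) : ∀ (l h : List Int) (w : Int),
    l.Perm h → List.Sorted (· ≤ ·) h →
    (g.foldl stepA (l, w)).2 = (g.foldl stepB (h, w)).2 := by
  induction g with
  | nil => intro l h w hp hs; rfl
  | cons sd g ih =>
    intro l h w hp hs
    obtain ⟨hw, hperm, hsort⟩ := step_sync l h w sd hp hs
    simp only [List.foldl_cons]
    have hA : stepA (l, w) sd = ((stepA (l, w) sd).1, (stepA (l, w) sd).2) := rfl
    have hB : stepB (h, w) sd = ((stepB (h, w) sd).1, (stepB (h, w) sd).2) := rfl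
    rw [hA, hB, hw]
    exact ih _ _ _ hperm hsort

-- A's waiting-time simulation equals B's heap simulation
lemma wait_eq (rs : List (Int × Int × Int)) (p : Int) :
    getWaitingTimeA rs p = waitB (rs.map (fun r => (r.1, r.2.1))) p := by
  have h1 : getWaitingTimeA rs p
      = ((rs.map (fun r => (r.1, r.2.1))).foldl stepA (initScheduleA p, 0)).2 := by
    unfold getWaitingTimeA
    rw [List.foldl_map]
  rw [h1, initA_eq]
  unfold waitB
  exact wait_fold_sync _ _ _ 0 (List.Perm.refl _) (sorted_replicate _)

-- zip with the index range is enumerate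
lemma zip_pyRange_eq_enumerate {α : Type} (cs : List α) : ∀ s : Int,
    (PySem.List.pyRange s (s + (cs.length : Int)) 1).zip cs = PySem.List.enumerate cs s := by
  induction cs with
  | nil =>
    intro s
    simp [PySem.List.enumerate_nil]
  | cons c cs ih =>
    intro s
    rw [PySem.List.pyRange_one_cons (by simp only [List.length_cons]; push_cast; omega)]
    have h2 : s + (((c :: cs).length : Nat) : Int) = (s + 1) + ((cs.length : Nat) : Int) := by
      simp only [List.length_cons]; push_cast; ring
    rw [h2]
    simp [List.zip_cons_cons, ih (s + 1), PySem.List.enumerate_cons]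

-- B's reduction list equals A's per-type reductions, indexed
lemma redListB_eq (k : Int) (reqs : List (Int × Int × Int)) (cs : List Int)
    (hk : 0 ≤ k) (hlen : cs.length = k.toNat) :
    redListB (groupsB k reqs) cs = (PySem.List.enumerate cs).map (fun ip =>
      getWaitingTimeA (reqs.filter (fun r => r.2.2 == ip.1 + 1)) ip.2
        - getWaitingTimeA (reqs.filter (fun r => r.2.2 == ip.1 + 1)) (ip.2 + 1)) := by
  unfold redListB groupsB
  have hkcs : k = ((cs.length : Nat) : Int) := by rw [hlen]; exact (Int.toNat_of_nonneg hk).symm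
  rw [hkcs, show ((cs.length : Nat) : Int) = 0 + ((cs.length : Nat) : Int) by ring]
  rw [List.zip_map_left, zip_pyRange_eq_enumerate cs 0]
  rw [List.map_map]
  refine List.map_congr_left ?_
  intro ip _
  simp only [Function.comp, Prod.map_fst, Prod.map_snd, id]
  rw [wait_eq, wait_eq]

-- A's strict-improvement scan = B's first-max scan, in sync
lemma best_sync (reqs : List (Int × Int × Int)) : ∀ (cs : List Int) (i m b : Int),
    (cs.foldl (bestBodyA reqs) (i, some m, b)).2.2 =
      (((PySem.List.enumerate cs i).map (fun ip =>
          getWaitingTimeA (reqs.filter (fun r => r.2.2 == ip.1 + 1)) ip.2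
            - getWaitingTimeA (reqs.filter (fun r => r.2.2 == ip.1 + 1)) (ip.2 + 1))).foldl
        argBodyB (i, b, m)).2.1 := by
  intro cs
  induction cs with
  | nil => intro i m b; rfl
  | cons c cs ih =>
    intro i m b
    rw [PySem.List.enumerate_cons]
    simp only [List.map_cons, List.foldl_cons]
    by_cases hc : getWaitingTimeA (reqs.filter (fun r => r.2.2 == i + 1)) c
        - getWaitingTimeA (reqs.filter (fun r => r.2.2 == i + 1)) (c + 1) > m
    · rw [show bestBodyA reqs (i, some m, b) c
            = (i + 1, some (getWaitingTimeA (reqs.filter (fun r => r.2.2 == i + 1)) c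
                - getWaitingTimeA (reqs.filter (fun r => r.2.2 == i + 1)) (c + 1)), i) by
          simp only [bestBodyA]; rw [if_pos hc]]
      rw [show argBodyB (i, b, m) (getWaitingTimeA (reqs.filter (fun r => r.2.2 == i + 1)) c
            - getWaitingTimeA (reqs.filter (fun r => r.2.2 == i + 1)) (c + 1))
            = (i + 1, i, getWaitingTimeA (reqs.filter (fun r => r.2.2 == i + 1)) c
                - getWaitingTimeA (reqs.filter (fun r => r.2.2 == i + 1)) (c + 1)) by
          simp only [argBodyB]; rw [if_pos hc]]
      exact ih (i + 1) _ i
    · rw [show bestBodyA reqs (i, some m, b) c = (i + 1, some m, b) by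
          simp only [bestBodyA]; rw [if_neg hc]]
      rw [show argBodyB (i, b, m) (getWaitingTimeA (reqs.filter (fun r => r.2.2 == i + 1)) c
            - getWaitingTimeA (reqs.filter (fun r => r.2.2 == i + 1)) (c + 1))
            = (i + 1, b, m) by
          simp only [argBodyB]; rw [if_neg hc]]
      exact ih (i + 1) m b

lemma best_eq (k : Int) (reqs : List (Int × Int × Int)) (cs : List Int)
    (hk : 0 ≤ k) (hlen : cs.length = k.toNat) :
    getBestA reqs cs = argmaxB (redListB (groupsB k reqs) cs) := by
  rw [redListB_eq k reqs cs hk hlen]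
  cases cs with
  | nil => rfl
  | cons c cs =>
    rw [PySem.List.enumerate_cons]
    simp only [List.map_cons]
    unfold getBestA argmaxB
    simp only [List.foldl_cons]
    rw [show bestBodyA reqs (0, none, -1) c
          = (1, some (getWaitingTimeA (reqs.filter (fun r => r.2.2 == (0 : Int) + 1)) c
              - getWaitingTimeA (reqs.filter (fun r => r.2.2 == (0 : Int) + 1)) (c + 1)), 0) from rfl]
    exact best_sync reqs cs 1 _ 0

lemma alloc_eq (k : Int) (reqs : List (Int × Int × Int)) (hk : 0 ≤ k) :
    ∀ (L : List Int) (cs : List Int), cs.length = k.toNat →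
      L.foldl (fun cs _ => allocStepA reqs cs) cs
        = L.foldl (fun cs _ => allocStepB (groupsB k reqs) cs) cs ∧
      (L.foldl (fun cs _ => allocStepB (groupsB k reqs) cs) cs).length = k.toNat := by
  intro L
  induction L with
  | nil => intro cs hlen; exact ⟨rfl, hlen⟩
  | cons x L ih =>
    intro cs hlen
    have hstep : allocStepA reqs cs = allocStepB (groupsB k reqs) cs := by
      unfold allocStepA allocStepB
      rw [best_eq k reqs cs hk hlen]
    have hlen' : (allocStepB (groupsB k reqs) cs).length = k.toNat := by
      unfold allocStepB
      rw [PySem.List.length_pySetD, hlen]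
    simp only [List.foldl_cons, hstep]
    exact ih _ hlen'

-- ===== VERDICT (by name: the statement is the Claim_ definition above) =====
theorem solution_spec : Claim_equal_solution := by
  intro k n reqs _ hpre
  unfold Spec_solution solution solution_alt
  dsimp only
  by_cases hk : 0 < k
  · obtain ⟨hcnt, hlen⟩ := alloc_eq k reqs (le_of_lt hk) (PySem.List.pyRange 0 (n - k) 1)
      (List.replicate k.toNat 1) (by simp)
    rw [hcnt]
    set cnt := (PySem.List.pyRange 0 (n - k) 1).foldl
      (fun cs _ => allocStepB (groupsB k reqs) cs) (List.replicate k.toNat 1) with hcntdef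
    rw [PySem.List.foldl_add _ (fun t => getWaitingTimeA
      (reqs.filter (fun r => r.2.2 == t + 1)) (PySem.List.pyGetD cnt t 0)) 0]
    unfold groupsB
    have hkcnt : k = 0 + ((cnt.length : Nat) : Int) := by
      rw [hlen, Int.toNat_of_nonneg (le_of_lt hk)]; ring
    rw [show PySem.List.pyRange 0 k 1 = PySem.List.pyRange 0 (0 + ((cnt.length : Nat) : Int)) 1 by
      rw [← hkcnt]]
    rw [List.zip_map_left, zip_pyRange_eq_enumerate cnt 0]
    rw [PySem.List.enumerate_eq_map_pyRange cnt 0]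
    rw [show PySem.List.len cnt = ((cnt.length : Nat) : Int) from rfl]
    rw [show PySem.List.pyRange 0 ((cnt.length : Nat) : Int) = PySem.List.pyRange 0 (0 + ((cnt.length : Nat) : Int)) 1 by
      rw [zero_add]]
    rw [List.map_map, List.map_map]
    have hmaps : (PySem.List.pyRange 0 (0 + ((cnt.length : Nat) : Int)) 1).map
          (((fun gc : List (Int × Int) × Int => waitB gc.1 gc.2) ∘ Prod.map
            (fun i => (reqs.filter (fun r => r.2.2 == i + 1)).map (fun r => (r.1, r.2.1))) id) ∘
            fun j => (j, PySem.List.pyGetD cnt j 0))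
        = (PySem.List.pyRange 0 (0 + ((cnt.length : Nat) : Int)) 1).map
          (fun t => getWaitingTimeA (reqs.filter (fun r => r.2.2 == t + 1))
            (PySem.List.pyGetD cnt t 0)) := by
      refine List.map_congr_left ?_
      intro t _
      simp only [Function.comp, Prod.map_fst, Prod.map_snd, id]
      rw [wait_eq]
    rw [hmaps]
    ring
  · -- k ≤ 0: under Pre_ then n ≤ k, both loops are empty and both sides are 0
    have hnk : n ≤ k := by
      unfold Pre_solution at hpre
      omega
    have hr1 : PySem.List.pyRange 0 (n - k) 1 = [] := by
      rcases h : PySem.List.pyRange 0 (n - k) 1 with _ | ⟨x, t⟩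
      · rfl
      · exfalso
        have hx : x ∈ PySem.List.pyRange 0 (n - k) 1 := by rw [h]; exact List.mem_cons_self
        rw [PySem.List.mem_pyRange_one] at hx
        omega
    have hr2 : PySem.List.pyRange 0 k 1 = [] := by
      rcases h : PySem.List.pyRange 0 k 1 with _ | ⟨x, t⟩
      · rfl
      · exfalso
        have hx : x ∈ PySem.List.pyRange 0 k 1 := by rw [h]; exact List.mem_cons_self
        rw [PySem.List.mem_pyRange_one] at hx
        omega
    unfold groupsB
    rw [hr1, hr2]
    simp
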